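-- pv_equiv track=rewrite | github.com/swyoo5/BaekJoon | 프로그래머스/1/17681. ［1차］ 비밀지도/［1차］ 비밀지도.py | solution
-- ===== SOURCE A (Python) =====
-- def solution(n, arr1, arr2):
--     answer = []
--     for idx in range(len(arr1)) :
--         arr1_num = arr1[idx]
--         arr2_num = arr2[idx]
--         wall_str = ""
--         for _ in range(len(arr1)) :
--             if arr1_num % 2 == 1 or arr2_num % 2 == 1 :
--                 wall_str = '#' + wall_str
--             else :
--                 wall_str = ' ' + wall_str
--             arr1_num //= 2
--             arr2_num //= 2
--         answer.append(wall_str)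
--     return answer
-- ===== SOURCE B (Python) =====
-- def solution(n, arr1, arr2):
--     m = len(arr1)
--     mask = (1 << m) - 1
--     tbl = str.maketrans('10', '# ')
--     return [format((a | b) & mask, f'0{m}b').translate(tbl) for a, b in zip(arr1, arr2)]
-- ===== Notes on version B (the rewrite author's own statement) =====
-- stated objective: idiomatic
-- what changed: B replaces A's nested per-bit state-mutation loop (two running numbers halved with //= and a string built by prepending) by the idiomatic zip comprehension that computes a|b once per row, truncates it to len(arr1) bits with a mask, renders the row in one step via format(v, f'0{m}b') and maps '1'/'0' to '#'/' ' with str.translate, moving the per-bit work into C builtins.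
import Mathlib
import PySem

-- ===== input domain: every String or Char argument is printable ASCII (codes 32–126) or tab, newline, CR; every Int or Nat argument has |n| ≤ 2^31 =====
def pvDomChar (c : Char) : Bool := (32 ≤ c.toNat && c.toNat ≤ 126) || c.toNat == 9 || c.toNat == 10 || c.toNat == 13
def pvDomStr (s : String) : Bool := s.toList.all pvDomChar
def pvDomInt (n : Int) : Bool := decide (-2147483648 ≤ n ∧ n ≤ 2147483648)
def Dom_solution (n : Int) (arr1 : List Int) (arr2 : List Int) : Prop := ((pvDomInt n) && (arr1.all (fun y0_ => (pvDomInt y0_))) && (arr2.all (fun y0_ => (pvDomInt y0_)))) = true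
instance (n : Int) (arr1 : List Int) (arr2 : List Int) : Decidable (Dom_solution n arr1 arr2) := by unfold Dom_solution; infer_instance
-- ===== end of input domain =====

-- B replaces A's nested per-bit state-mutation loop by the idiomatic zip comprehension:
-- a|b once per row, masked to len(arr1) bits, rendered via format(v, f'0{m}b'),
-- then '1'->'#' and '0'->' ' via str.translate.  Objective: idiomatic.

-- ===== PORT A =====
-- inner 'for _ in range(len(arr1))' loop with state (arr1_num, arr2_num, wall_str);
-- wall_str is built by prepending ('#' + wall_str), kept as a char list, String.mk at the end
def rowLoop : Nat → Int → Int → List Char → List Char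
  | 0, _, _, s => s
  | k + 1, a, b, s =>
      rowLoop k (PySem.Int.floordiv a 2) (PySem.Int.floordiv b 2)
        ((if PySem.Int.mod a 2 = 1 ∨ PySem.Int.mod b 2 = 1 then '#' else ' ') :: s)

def solution (n : Int) (arr1 : List Int) (arr2 : List Int) : List String :=
  (PySem.List.pyRange 0 arr1.length 1).foldl
    (fun answer idx =>
      answer ++
        [String.mk (rowLoop arr1.length (PySem.List.pyGetD arr1 idx 0)
          (PySem.List.pyGetD arr2 idx 0) [])])
    []

-- ===== PORT B =====
-- str.maketrans('10', '# ') / .translate: '1'->'#', '0'->' ', any other char unchanged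
def pyTr (c : Char) : Char := if c = '1' then '#' else if c = '0' then ' ' else c

-- format(v, f'0{m}b') = binary digits of v (PySem.Int.toBinChars) left-padded with '0'
-- to width m; exact for v ≥ 0, and here v = (a|b) & mask is always nonnegative
def solution_alt (n : Int) (arr1 : List Int) (arr2 : List Int) : List String :=
  let m := arr1.length
  let mask : Int := ((1 : Int) <<< m) - 1
  (arr1.zip arr2).map (fun p =>
    let ds := PySem.Int.toBinChars (PySem.Int.band (PySem.Int.bor p.1 p.2) mask)
    String.mk ((List.replicate (m - ds.length) '0' ++ ds).map pyTr))

-- ===== PRECONDITION & SPEC =====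
-- A raises IndexError at arr2[idx] when arr2 is shorter than arr1; exactly those inputs are excluded.
def Pre_solution (n : Int) (arr1 : List Int) (arr2 : List Int) : Prop :=
  arr1.length ≤ arr2.length
instance (n : Int) (arr1 : List Int) (arr2 : List Int) : Decidable (Pre_solution n arr1 arr2) := by unfold Pre_solution; infer_instance

def pvWitness_solution : Int × List Int × List Int := (2, [9, 20], [30, 1])

def Spec_solution (n : Int) (arr1 : List Int) (arr2 : List Int) (out : List String) : Prop := out = solution_alt n arr1 arr2
instance (n : Int) (arr1 : List Int) (arr2 : List Int) (out : List String) : Decidable (Spec_solution n arr1 arr2 out) := by unfold Spec_solution; infer_instance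

-- ===== CLAIM (what is proved, stated in full; the proofs are below) =====
def Claim_equal_solution : Prop := ∀ (n : Int) (arr1 : List Int) (arr2 : List Int), Dom_solution n arr1 arr2 → Pre_solution n arr1 arr2 → Spec_solution n arr1 arr2 (solution n arr1 arr2)

-- ===== LEMMAS AND PROOFS =====

-- one-bit peeling of Nat ||| and &&&
theorem nat_lor_step (m n : Nat) :
    m ||| n = 2 * (m / 2 ||| n / 2) + (if m % 2 = 1 ∨ n % 2 = 1 then 1 else 0) := by
  apply Nat.eq_of_testBit_eq
  intro i
  cases i with
  | zero =>
      simp only [Nat.testBit_lor, Nat.testBit_zero]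
      rcases Nat.mod_two_eq_zero_or_one m with hm | hm <;>
        rcases Nat.mod_two_eq_zero_or_one n with hn | hn <;>
          simp [hm, hn]
  | succ i =>
      have h2 : (2 * (m / 2 ||| n / 2) + (if m % 2 = 1 ∨ n % 2 = 1 then 1 else 0)) / 2
          = m / 2 ||| n / 2 := by split <;> omega
      rw [Nat.testBit_lor, Nat.testBit_succ, Nat.testBit_succ, Nat.testBit_succ, h2,
        Nat.testBit_lor]

theorem nat_land_step (m n : Nat) :
    m &&& n = 2 * (m / 2 &&& n / 2) + (if m % 2 = 1 ∧ n % 2 = 1 then 1 else 0) := by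
  apply Nat.eq_of_testBit_eq
  intro i
  cases i with
  | zero =>
      simp only [Nat.testBit_and, Nat.testBit_zero]
      rcases Nat.mod_two_eq_zero_or_one m with hm | hm <;>
        rcases Nat.mod_two_eq_zero_or_one n with hn | hn <;>
          simp [hm, hn]
  | succ i =>
      have h2 : (2 * (m / 2 &&& n / 2) + (if m % 2 = 1 ∧ n % 2 = 1 then 1 else 0)) / 2
          = m / 2 &&& n / 2 := by split <;> omega
      rw [Nat.testBit_and, Nat.testBit_succ, Nat.testBit_succ, Nat.testBit_succ, h2,
        Nat.testBit_and]

-- PySem.Int.bor on the four sign patterns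
theorem bor_nat_nat (m n : Nat) : PySem.Int.bor (m : Int) (n : Int) = ((m ||| n : Nat) : Int) := by
  simp [PySem.Int.bor]

theorem bor_nat_neg (m n : Nat) :
    PySem.Int.bor (m : Int) (Int.negSucc n) = -((n - (n &&& m) : Nat) : Int) - 1 := by
  simp only [PySem.Int.bor]
  rw [if_pos (Int.natCast_nonneg m), if_neg (by simp [Int.negSucc_eq]; omega)]
  have h : -Int.negSucc n - 1 = (n : Int) := by rw [Int.negSucc_eq]; ring
  rw [h]; simp

theorem bor_neg_nat (m n : Nat) :
    PySem.Int.bor (Int.negSucc m) (n : Int) = -((m - (m &&& n) : Nat) : Int) - 1 := by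
  simp only [PySem.Int.bor]
  rw [if_neg (by simp [Int.negSucc_eq]; omega), if_pos (Int.natCast_nonneg n)]
  have h : -Int.negSucc m - 1 = (m : Int) := by rw [Int.negSucc_eq]; ring
  rw [h]; simp

theorem bor_neg_neg (m n : Nat) :
    PySem.Int.bor (Int.negSucc m) (Int.negSucc n) = -((m &&& n : Nat) : Int) - 1 := by
  simp only [PySem.Int.bor]
  rw [if_neg (by simp [Int.negSucc_eq]; omega), if_neg (by simp [Int.negSucc_eq]; omega)]
  have h1 : -Int.negSucc m - 1 = (m : Int) := by rw [Int.negSucc_eq]; ring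
  have h2 : -Int.negSucc n - 1 = (n : Int) := by rw [Int.negSucc_eq]; ring
  rw [h1, h2]; simp

theorem fd_natCast2 (k : Nat) : PySem.Int.floordiv (k : Int) 2 = ((k / 2 : Nat) : Int) := by
  exact_mod_cast PySem.Int.floordiv_natCast k 2

theorem mod_natCast2 (k : Nat) : PySem.Int.mod (k : Int) 2 = ((k % 2 : Nat) : Int) := by
  exact_mod_cast PySem.Int.mod_natCast k 2

theorem fd_negSucc (m : Nat) :
    PySem.Int.floordiv (Int.negSucc m) 2 = Int.negSucc (m / 2) := by
  rw [PySem.Int.floordiv_eq_iff_of_pos (by norm_num), Int.negSucc_eq, Int.negSucc_eq]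
  constructor <;> push_cast <;> omega

theorem mod_negSucc (m : Nat) :
    PySem.Int.mod (Int.negSucc m) 2 = 1 - ((m % 2 : Nat) : Int) := by
  rw [PySem.Int.mod_eq_emod_of_pos (by norm_num), Int.negSucc_eq]
  push_cast
  omega

-- one-bit peeling of Python's a | b on Int
theorem bor_step (a b : Int) :
    PySem.Int.bor a b =
      2 * PySem.Int.bor (PySem.Int.floordiv a 2) (PySem.Int.floordiv b 2) +
        (if PySem.Int.mod a 2 = 1 ∨ PySem.Int.mod b 2 = 1 then 1 else 0) := by
  cases a with
  | ofNat m =>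
    cases b with
    | ofNat n =>
      rw [Int.ofNat_eq_natCast, Int.ofNat_eq_natCast, bor_nat_nat, fd_natCast2, fd_natCast2,
        bor_nat_nat, mod_natCast2, mod_natCast2, nat_lor_step m n]
      rcases Nat.mod_two_eq_zero_or_one m with hm | hm <;>
        rcases Nat.mod_two_eq_zero_or_one n with hn | hn <;>
          simp [hm, hn]
    | negSucc n =>
      rw [Int.ofNat_eq_natCast, bor_nat_neg, fd_natCast2, fd_negSucc, bor_nat_neg,
        mod_natCast2, mod_negSucc]
      have h1 := nat_land_step n m
      have h2 : n &&& m ≤ n := Nat.and_le_left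
      have h3 : n / 2 &&& m / 2 ≤ n / 2 := Nat.and_le_left
      rcases Nat.mod_two_eq_zero_or_one m with hm | hm <;>
        rcases Nat.mod_two_eq_zero_or_one n with hn | hn <;>
          simp [hm, hn] at h1 ⊢ <;> omega
  | negSucc m =>
    cases b with
    | ofNat n =>
      rw [Int.ofNat_eq_natCast, bor_neg_nat, fd_negSucc, fd_natCast2, bor_neg_nat,
        mod_negSucc, mod_natCast2]
      have h1 := nat_land_step m n
      have h2 : m &&& n ≤ m := Nat.and_le_left
      have h3 : m / 2 &&& n / 2 ≤ m / 2 := Nat.and_le_left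
      rcases Nat.mod_two_eq_zero_or_one m with hm | hm <;>
        rcases Nat.mod_two_eq_zero_or_one n with hn | hn <;>
          simp [hm, hn] at h1 ⊢ <;> omega
    | negSucc n =>
      rw [bor_neg_neg, fd_negSucc, fd_negSucc, bor_neg_neg, mod_negSucc, mod_negSucc]
      have h1 := nat_land_step m n
      rcases Nat.mod_two_eq_zero_or_one m with hm | hm <;>
        rcases Nat.mod_two_eq_zero_or_one n with hn | hn <;>
          simp [hm, hn] at h1 ⊢ <;> omega

-- Python's x & (2^m - 1) is x mod 2^m (two's-complement mask extraction)
theorem band_mask (x : Int) (m : Nat) :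
    PySem.Int.band x (((2 ^ m : Nat) : Int) - 1) = x % ((2 ^ m : Nat) : Int) := by
  have hK : (1 : Nat) ≤ 2 ^ m := Nat.one_le_two_pow
  have hmask : (((2 ^ m : Nat) : Int) - 1) = ((2 ^ m - 1 : Nat) : Int) := by push_cast [hK]; ring
  cases x with
  | ofNat k =>
    rw [Int.ofNat_eq_natCast, hmask, PySem.Int.band_of_nonneg (Int.natCast_nonneg k)
      (Int.natCast_nonneg _)]
    simp only [Int.toNat_natCast]
    rw [Nat.and_two_pow_sub_one_eq_mod, Int.natCast_mod]
  | negSucc k =>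
    simp only [PySem.Int.band]
    rw [if_neg (by simp [Int.negSucc_eq]; omega),
      if_pos (by rw [hmask]; exact Int.natCast_nonneg _)]
    have h1 : -Int.negSucc k - 1 = (k : Int) := by rw [Int.negSucc_eq]; ring
    rw [h1, hmask]
    simp only [Int.toNat_natCast]
    rw [Nat.and_comm, Nat.and_two_pow_sub_one_eq_mod, Int.negSucc_eq]
    generalize (2 : Nat) ^ m = K at *
    obtain ⟨q, r, hr, rfl⟩ : ∃ q r, r < K ∧ k = K * q + r :=
      ⟨k / K, k % K, Nat.mod_lt _ (by omega), (Nat.div_add_mod k K).symm⟩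
    have hmod : (K * q + r) % K = r := by
      rw [Nat.mul_add_mod, Nat.mod_eq_of_lt hr]
    rw [hmod]
    have hle : 1 + r ≤ K := by omega
    have hx : -(((K * q + r : Nat) : Int) + 1) = ((K - 1 - r : Nat) : Int)
        + (K : Int) * (-((q : Nat) : Int) - 1) := by
      push_cast [Nat.sub_sub, Nat.cast_sub hle]
      ring
    rw [hx, Int.add_mul_emod_self_left, Int.emod_eq_of_lt (Int.natCast_nonneg _)
      (by push_cast [Nat.sub_sub, Nat.cast_sub hle]; omega)]

-- accumulator form of A's inner loop
theorem rowLoop_append (k : Nat) : ∀ (a b : Int) (s : List Char),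
    rowLoop k a b s = rowLoop k a b [] ++ s := by
  induction k with
  | zero => intro a b s; rfl
  | succ k ih =>
      intro a b s
      rw [rowLoop, rowLoop, ih _ _ (_ :: _), ih _ _ (_ :: _)]
      simp

-- '#'/' ' bit characters of an Int, least significant bit last
def bitsOr : Nat → Int → List Char
  | 0, _ => []
  | k + 1, v => bitsOr k (PySem.Int.floordiv v 2) ++
      [if PySem.Int.mod v 2 = 1 then '#' else ' ']

theorem rowLoop_eq_bitsOr (m : Nat) : ∀ (a b : Int),
    rowLoop m a b [] = bitsOr m (PySem.Int.bor a b) := by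
  induction m with
  | zero => intro a b; rfl
  | succ m ih =>
      intro a b
      have hs := bor_step a b
      have h1 : PySem.Int.floordiv (PySem.Int.bor a b) 2 =
          PySem.Int.bor (PySem.Int.floordiv a 2) (PySem.Int.floordiv b 2) := by
        rw [hs, PySem.Int.floordiv_eq_ediv_of_pos (by norm_num)]
        split <;> omega
      have h2 : PySem.Int.mod (PySem.Int.bor a b) 2 =
          (if PySem.Int.mod a 2 = 1 ∨ PySem.Int.mod b 2 = 1 then 1 else 0) := by
        rw [hs, PySem.Int.mod_eq_emod_of_pos (by norm_num)]
        split <;> omega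
      rw [rowLoop, rowLoop_append, ih, bitsOr, h1, h2]
      have hch : (if (if PySem.Int.mod a 2 = 1 ∨ PySem.Int.mod b 2 = 1 then (1:Int) else 0) = 1
          then '#' else ' ') = (if PySem.Int.mod a 2 = 1 ∨ PySem.Int.mod b 2 = 1 then '#' else ' ') := by
        by_cases hc : PySem.Int.mod a 2 = 1 ∨ PySem.Int.mod b 2 = 1
        · rw [if_pos hc, if_pos hc, if_pos rfl]
        · rw [if_neg hc, if_neg hc, if_neg (by norm_num)]
      rw [hch]

-- '1'/'0' bit characters of a Nat, least significant bit last
def bitsN : Nat → Nat → List Char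
  | 0, _ => []
  | k + 1, w => bitsN k (w / 2) ++ [if w % 2 = 1 then '1' else '0']

theorem emod_pow_succ (v : Int) (k : Nat) :
    v % (2 : Int) ^ (k + 1) = 2 * ((v / 2) % (2 : Int) ^ k) + v % 2 := by
  have hK : (0 : Int) < 2 ^ k := by positivity
  have hA0 : 0 ≤ (v / 2) % (2 : Int) ^ k := Int.emod_nonneg _ (by omega)
  have hA1 : (v / 2) % (2 : Int) ^ k < 2 ^ k := Int.emod_lt_of_pos _ hK
  have hv : 2 * (v / 2) + v % 2 = v := Int.mul_ediv_add_emod v 2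
  have hu : (2:Int) ^ k * ((v / 2) / 2 ^ k) + (v / 2) % 2 ^ k = v / 2 :=
    Int.mul_ediv_add_emod (v / 2) ((2:Int) ^ k)
  have ht0 : 0 ≤ v % 2 := Int.emod_nonneg _ (by omega)
  have ht1 : v % 2 < 2 := Int.emod_lt_of_pos _ (by omega)
  have hx : v = (2 * ((v / 2) % (2 : Int) ^ k) + v % 2)
      + ((2:Int) ^ (k + 1)) * ((v / 2) / 2 ^ k) := by
    rw [pow_succ]
    linear_combination -hv - 2 * hu
  conv_lhs => rw [hx]
  rw [Int.add_mul_emod_self_left, Int.emod_eq_of_lt (by omega) (by rw [pow_succ]; omega)]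

theorem bitsOr_eq_bitsN (m : Nat) : ∀ (v : Int),
    bitsOr m v = (bitsN m (v % (2 : Int) ^ m).toNat).map pyTr := by
  induction m with
  | zero => intro v; rfl
  | succ m ih =>
      intro v
      have h := emod_pow_succ v m
      have hA0 : 0 ≤ (v / 2) % (2 : Int) ^ m := Int.emod_nonneg _ (by positivity)
      have ht0 : 0 ≤ v % 2 := Int.emod_nonneg _ (by omega)
      have ht1 : v % 2 < 2 := Int.emod_lt_of_pos _ (by omega)
      have hw2 : (v % (2 : Int) ^ (m + 1)).toNat / 2 = ((v / 2) % (2 : Int) ^ m).toNat := by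
        omega
      have hwm : (v % (2 : Int) ^ (m + 1)).toNat % 2 = (v % 2).toNat := by
        omega
      rw [bitsOr, bitsN, hw2, hwm]
      rw [ih (PySem.Int.floordiv v 2), PySem.Int.floordiv_eq_ediv_of_pos (by norm_num)]
      rw [List.map_append]
      congr 1
      have hmv : PySem.Int.mod v 2 = v % 2 := PySem.Int.mod_eq_emod_of_pos (by norm_num)
      by_cases hc : v % 2 = 1
      · rw [if_pos (by rw [hmv]; exact hc), if_pos (by omega)]; rfl
      · rw [if_neg (by rw [hmv]; exact hc), if_neg (by omega)]; rfl

-- minimal binary digit list, as produced by Nat.toDigits 2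
def binN (w : Nat) : List Char :=
  if _h : w ≤ 1 then [Nat.digitChar w]
  else binN (w / 2) ++ [Nat.digitChar (w % 2)]
decreasing_by exact Nat.div_lt_self (by omega) (by omega)

theorem toDigitsCore_acc (f : Nat) : ∀ (n : Nat) (ds : List Char),
    Nat.toDigitsCore 2 f n ds = Nat.toDigitsCore 2 f n [] ++ ds := by
  induction f with
  | zero => intro n ds; simp [Nat.toDigitsCore]
  | succ f ih =>
      intro n ds
      by_cases h : n / 2 = 0 <;> simp only [Nat.toDigitsCore, h, if_true, if_false]
      · simp
      · rw [ih (n / 2) (Nat.digitChar (n % 2) :: ds), ih (n / 2) [Nat.digitChar (n % 2)]]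
        simp

theorem toDigitsCore_eq_binN (f : Nat) : ∀ (w : Nat), w ≤ f →
    Nat.toDigitsCore 2 (f + 1) w [] = binN w := by
  induction f with
  | zero =>
      intro w hw
      interval_cases w
      simp [Nat.toDigitsCore, binN]
  | succ f ih =>
      intro w hw
      by_cases h : w / 2 = 0
      · have hw1 : w ≤ 1 := by omega
        have : Nat.digitChar (w % 2) = Nat.digitChar w := by
          interval_cases w <;> rfl
        rw [show Nat.toDigitsCore 2 (f + 1 + 1) w [] =
            if w / 2 = 0 then [Nat.digitChar (w % 2)]
            else Nat.toDigitsCore 2 (f + 1) (w / 2) [Nat.digitChar (w % 2)] from rfl,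
          if_pos h, this, binN, dif_pos hw1]
      · rw [show Nat.toDigitsCore 2 (f + 1 + 1) w [] =
            if w / 2 = 0 then [Nat.digitChar (w % 2)]
            else Nat.toDigitsCore 2 (f + 1) (w / 2) [Nat.digitChar (w % 2)] from rfl,
          if_neg h, toDigitsCore_acc, ih (w / 2) (by omega)]
        conv_rhs => rw [binN, dif_neg (show ¬ w ≤ 1 by omega)]

theorem toDigits_eq_binN (w : Nat) : Nat.toDigits 2 w = binN w :=
  toDigitsCore_eq_binN w w (Nat.le_refl w)

theorem bitsN_zero (m : Nat) : bitsN m 0 = List.replicate m '0' := by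
  induction m with
  | zero => rfl
  | succ m ih => rw [bitsN, Nat.zero_div, ih, List.replicate_succ']; rfl

-- zero-padded binary digit list = LSB-last bit characters, width m
theorem pad_binN_eq_bitsN (m : Nat) : ∀ (w : Nat), 1 ≤ m → w < 2 ^ m →
    List.replicate (m - (binN w).length) '0' ++ binN w = bitsN m w := by
  induction m with
  | zero => intro w h; omega
  | succ m ih =>
      intro w _ hw
      by_cases hw1 : w ≤ 1
      · have hb : binN w = [Nat.digitChar w] := by rw [binN, dif_pos hw1]
        have hd : (if w % 2 = 1 then '1' else '0') = Nat.digitChar w := by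
          interval_cases w <;> rfl
        have hz : w / 2 = 0 := by omega
        rw [hb, bitsN, hz, bitsN_zero, hd]
        simp [List.replicate_succ']
      · have hm : 1 ≤ m := by
          by_contra hm
          have : m = 0 := by omega
          subst this
          simp at hw
          omega
        have hb : binN w = binN (w / 2) ++ [Nat.digitChar (w % 2)] := by
          rw [binN, dif_neg hw1]
        have hd : (if w % 2 = 1 then '1' else '0') = Nat.digitChar (w % 2) := by
          have : w % 2 = 0 ∨ w % 2 = 1 := by omega
          rcases this with h | h <;> rw [h] <;> rfl
        have hhalf : w / 2 < 2 ^ m := by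
          have : 2 ^ (m + 1) = 2 ^ m * 2 := by rw [pow_succ]
          omega
        rw [hb, bitsN, hd, ← ih (w / 2) hm hhalf]
        have hlen : m + 1 - ((binN (w / 2)).length + 1) = m - (binN (w / 2)).length := by omega
        simp [List.length_append, hlen]

-- the full per-row equality
theorem row_eq (m : Nat) (hm : 1 ≤ m) (a b : Int) :
    rowLoop m a b [] =
      (List.replicate
          (m - (PySem.Int.toBinChars
            (PySem.Int.band (PySem.Int.bor a b) (((1 : Int) <<< m) - 1))).length) '0' ++
        PySem.Int.toBinChars
          (PySem.Int.band (PySem.Int.bor a b) (((1 : Int) <<< m) - 1))).map pyTr := by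
  have hsh : ((1 : Int) <<< m) - 1 = ((2 ^ m : Nat) : Int) - 1 := by
    rw [Int.shiftLeft_eq]; push_cast; ring
  have hpow : ((2 ^ m : Nat) : Int) = (2 : Int) ^ m := by push_cast; ring
  have hKpos : (0 : Int) < (2 : Int) ^ m := by positivity
  have hV0 : 0 ≤ PySem.Int.bor a b % (2 : Int) ^ m := Int.emod_nonneg _ (by omega)
  have hVlt : PySem.Int.bor a b % (2 : Int) ^ m < (2 : Int) ^ m := Int.emod_lt_of_pos _ hKpos
  have hmask : PySem.Int.band (PySem.Int.bor a b) (((1 : Int) <<< m) - 1)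
      = PySem.Int.bor a b % (2 : Int) ^ m := by
    rw [hsh, band_mask, hpow]
  have hbin : PySem.Int.toBinChars (PySem.Int.band (PySem.Int.bor a b) (((1 : Int) <<< m) - 1))
      = binN (PySem.Int.bor a b % (2 : Int) ^ m).toNat := by
    rw [hmask, PySem.Int.toBinChars, if_neg (by omega), toDigits_eq_binN]
  have hwlt : (PySem.Int.bor a b % (2 : Int) ^ m).toNat < 2 ^ m := by
    have : ((2 ^ m : Nat) : Int) = (2 : Int) ^ m := hpow
    omega
  rw [hbin, rowLoop_eq_bitsOr, bitsOr_eq_bitsN,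
    pad_binN_eq_bitsN m (PySem.Int.bor a b % (2 : Int) ^ m).toNat hm hwlt]

-- ===== VERDICT (by name: the statement is the Claim_ definition above) =====
theorem solution_spec : Claim_equal_solution := by
  intro n arr1 arr2 _ hpre
  have hpre' : arr1.length ≤ arr2.length := hpre
  unfold Spec_solution solution solution_alt
  simp only []
  rw [PySem.List.foldl_append_singleton_eq_map, List.nil_append,
    show ((arr1.length : Nat) : Int) = ((arr1.length : Nat) : Int) from rfl,
    PySem.List.pyRange_zero_natCast, List.map_map]
  apply List.ext_getElem
  · simp [List.length_zip]
    omega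
  · intro i h1 h2
    simp only [List.getElem_map, List.getElem_range, Function.comp_apply, List.getElem_zip]
    have hi1 : i < arr1.length := by
      simp only [List.length_map, List.length_range] at h1
      exact h1
    have hi2 : i < arr2.length := by omega
    rw [PySem.List.pyGetD_natCast, PySem.List.pyGetD_natCast,
      List.getD_eq_getElem arr1 0 hi1, List.getD_eq_getElem arr2 0 hi2]
    exact congrArg String.mk (row_eq arr1.length (by omega) arr1[i] arr2[i])
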